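-- pv_equiv track=rewrite | github.com/SudevOP1/CS-Lab-Experiments | Sem5_Advanced_Algorithms/1_check_notation/n3.py | n3
-- ===== SOURCE A (Python) =====
-- def n3(n):
--     a = 5
--     for i in range(n):
--         a += 1
--         for j in range(n):
--             a += 1
--             for k in range(n):
--                 a += 1
--     for k in range(n):
--         a += 1
--     return a
-- ===== SOURCE B (Python) =====
-- def n3(n):
--     m = max(n, 0)
--     return 5 + 2 * m + m * m + m * m * m
-- ===== Notes on version B (the rewrite author's own statement) =====
-- stated objective: faster
-- what changed: Replaced the triple nested counting loops with the closed-form polynomial 5 + 2m + m^2 + m^3 where m = max(n, 0).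
import Mathlib
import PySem

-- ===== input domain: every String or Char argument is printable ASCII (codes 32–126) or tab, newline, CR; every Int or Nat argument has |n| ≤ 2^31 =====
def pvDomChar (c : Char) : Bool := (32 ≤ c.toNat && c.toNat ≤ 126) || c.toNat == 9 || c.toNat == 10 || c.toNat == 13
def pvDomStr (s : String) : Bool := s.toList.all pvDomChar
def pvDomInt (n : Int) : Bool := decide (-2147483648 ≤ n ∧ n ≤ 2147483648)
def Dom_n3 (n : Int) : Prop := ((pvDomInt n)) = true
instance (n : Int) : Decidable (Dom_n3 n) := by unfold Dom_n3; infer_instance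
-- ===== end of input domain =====

-- B replaces A's triple nested counting loops by the closed-form polynomial 5 + 2m + m^2 + m^3 with m = max(n,0) (O(1) vs O(n^3)).


-- ===== PORT A =====
def n3 (n : Int) : Int :=
  let a : Int := 5
  let a := (PySem.List.pyRange 0 n 1).foldl (fun a _ =>
    let a := a + 1
    (PySem.List.pyRange 0 n 1).foldl (fun a _ =>
      let a := a + 1
      (PySem.List.pyRange 0 n 1).foldl (fun a _ => a + 1) a) a) a
  (PySem.List.pyRange 0 n 1).foldl (fun a _ => a + 1) a

-- ===== PORT B =====
def n3_alt (n : Int) : Int :=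
  let m := max n 0
  5 + 2 * m + m * m + m * m * m

-- ===== PRECONDITION & SPEC =====
def Spec_n3 (n : Int) (out : Int) : Prop := out = n3_alt n
instance (n : Int) (out : Int) : Decidable (Spec_n3 n out) := by unfold Spec_n3; infer_instance

-- ===== CLAIM (what is proved, stated in full; the proofs are below) =====
def Claim_equal_n3 : Prop := ∀ (n : Int), Dom_n3 n → Spec_n3 n (n3 n)

-- ===== LEMMAS AND PROOFS =====
-- a loop 'for _ in l: a += 1' adds l.length
theorem pv_fold1 (l : List Int) (a : Int) :
    l.foldl (fun a _ => a + 1) a = a + l.length := by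
  induction l generalizing a with
  | nil => simp
  | cons x xs ih => simp [List.foldl, ih]; push_cast [List.length_cons]; ring

-- the middle loop body adds 1 + N each iteration (N = inner range length)
theorem pv_fold2 (n : Int) (l : List Int) (a : Int) :
    l.foldl (fun a _ =>
      let a := a + 1
      (PySem.List.pyRange 0 n 1).foldl (fun a _ => a + 1) a) a
      = a + (1 + ((PySem.List.pyRange 0 n 1).length : Int)) * l.length := by
  induction l generalizing a with
  | nil => simp
  | cons x xs ih => rw [List.foldl_cons, ih, pv_fold1]; push_cast [List.length_cons]; ring

-- the outer loop body adds 1 + (1 + N) * N each iteration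
theorem pv_fold3 (n : Int) (l : List Int) (a : Int) :
    l.foldl (fun a _ =>
      let a := a + 1
      (PySem.List.pyRange 0 n 1).foldl (fun a _ =>
        let a := a + 1
        (PySem.List.pyRange 0 n 1).foldl (fun a _ => a + 1) a) a) a
      = a + (1 + (1 + ((PySem.List.pyRange 0 n 1).length : Int)) * (PySem.List.pyRange 0 n 1).length) * l.length := by
  induction l generalizing a with
  | nil => simp
  | cons x xs ih => rw [List.foldl_cons, ih, pv_fold2]; push_cast [List.length_cons]; ring

-- ===== VERDICT (by name: the statement is the Claim_ definition above) =====
theorem n3_spec : Claim_equal_n3 := by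
  intro n _
  unfold Spec_n3 n3 n3_alt
  simp only [pv_fold3]
  simp only [pv_fold1, PySem.List.length_pyRange_one]
  have h : ((n - 0).toNat : Int) = max n 0 := by
    rw [Int.ofNat_toNat]; ring_nf
  rw [h]
  ring
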